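-- pv_equiv track=rewrite | github.com/TengFeiyang01/Algorithm | bishi/9-18OA/d.py | max_flips
-- ===== SOURCE A (Python) =====
-- import heapq
--
-- def max_flips(arr):
--     flips = 0
--     cumulative_sum = 0
--     max_heap = []
--
--     for x in arr:
--         cumulative_sum += x
--         # 尝试翻转当前元素
--         cumulative_sum -= 2 * x
--         heapq.heappush(max_heap, -x)  # 使用最大堆，存储负值
--         flips += 1
--
--         # 如果累积和小于等于0，撤销之前翻转的最大元素
--         if cumulative_sum <= 0:
--             if max_heap:
--                 largest = -heapq.heappop(max_heap)
--                 cumulative_sum += 2 * largest  # 撤销翻转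
--                 flips -= 1
--             else:
--                 # 无法撤销翻转，累积和无法为正
--                 return flips
--
--     return flips
-- ===== SOURCE B (Python) =====
-- def max_flips(arr):
--     flips = 0
--     cumulative_sum = 0
--     flipped = []  # values currently flipped (plain list instead of a heap)
--     for x in arr:
--         cumulative_sum -= x   # add x, then flip it: net -x
--         flipped.append(x)
--         flips += 1
--         if cumulative_sum <= 0:
--             # undo the largest flipped value: linear scan instead of heap pop
--             m = flipped[0]
--             for v in flipped:
--                 if v > m:
--                     m = v
--             flipped.remove(m)
--             cumulative_sum += 2 * m
--             flips -= 1
--     return flips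
-- ===== Notes on version B (the rewrite author's own statement) =====
-- stated objective: simpler
-- what changed: Replaced the heapq max-heap of negated values by a plain list of flipped values with a linear max-scan plus remove when the running sum goes non-positive, and fused the +x/-2x update into a single -x.
import Mathlib
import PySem

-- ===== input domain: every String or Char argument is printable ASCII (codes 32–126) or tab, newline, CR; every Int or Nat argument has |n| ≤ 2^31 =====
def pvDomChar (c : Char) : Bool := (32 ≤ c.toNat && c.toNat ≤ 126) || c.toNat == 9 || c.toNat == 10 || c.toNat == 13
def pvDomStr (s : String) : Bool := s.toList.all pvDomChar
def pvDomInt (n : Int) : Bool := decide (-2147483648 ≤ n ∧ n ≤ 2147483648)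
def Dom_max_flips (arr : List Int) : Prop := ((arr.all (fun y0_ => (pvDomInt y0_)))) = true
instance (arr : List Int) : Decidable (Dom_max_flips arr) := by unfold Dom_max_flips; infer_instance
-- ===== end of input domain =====

-- B replaces A's heapq max-heap with a plain list and a linear max-scan removal: simpler, no heap machinery.


-- ===== PORT A =====
-- heapq.heappush on a min-heap, modelled exactly by its observable min-priority-queue
-- behaviour: ordered insert (heappop below is then head/tail, returning the minimum,
-- exactly what heapq.heappop returns).
def pvHeapPush (heap : List Int) (v : Int) : List Int :=
  match heap with
  | [] => [v]
  | y :: t => if v ≤ y then v :: y :: t else y :: pvHeapPush t v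

def pvMaxFlipsLoopA (arr : List Int) (flips cum : Int) (heap : List Int) : Int :=
  match arr with
  | [] => flips
  | x :: rest =>
    let cum1 := cum + x - 2 * x           -- cumulative_sum += x; cumulative_sum -= 2*x
    let heap1 := pvHeapPush heap (-x)     -- heapq.heappush(max_heap, -x)
    let flips1 := flips + 1
    if cum1 ≤ 0 then
      match heap1 with
      | [] => flips1                       -- 'else: return flips' (heap empty; unreachable)
      | h :: t =>                          -- largest = -heapq.heappop(max_heap)
        pvMaxFlipsLoopA rest (flips1 - 1) (cum1 + 2 * (-h)) t
    else
      pvMaxFlipsLoopA rest flips1 cum1 heap1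

def max_flips (arr : List Int) : Int := pvMaxFlipsLoopA arr 0 0 []

-- ===== PORT B =====
def pvMaxFlipsLoopB (arr : List Int) (flips cum : Int) (fl : List Int) : Int :=
  match arr with
  | [] => flips
  | x :: rest =>
    let cum1 := cum - x
    let fl1 := fl ++ [x]                  -- flipped.append(x)
    let flips1 := flips + 1
    if cum1 ≤ 0 then
      match fl1 with
      | [] => flips1                       -- unreachable: fl1 ends with x
      | h :: t =>
        let m := t.foldl (fun m v => if m < v then v else m) h   -- linear max scan
        match PySem.List.remove? fl1 m with                      -- flipped.remove(m)
        | none => flips1                   -- unreachable: m ∈ fl1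
        | some fl2 => pvMaxFlipsLoopB rest (flips1 - 1) (cum1 + 2 * m) fl2
    else
      pvMaxFlipsLoopB rest flips1 cum1 fl1

def max_flips_alt (arr : List Int) : Int := pvMaxFlipsLoopB arr 0 0 []

-- ===== PRECONDITION & SPEC =====
def Spec_max_flips (arr : List Int) (out : Int) : Prop := out = max_flips_alt arr
instance (arr : List Int) (out : Int) : Decidable (Spec_max_flips arr out) := by unfold Spec_max_flips; infer_instance

-- ===== CLAIM (what is proved, stated in full; the proofs are below) =====
def Claim_equal_max_flips : Prop := ∀ (arr : List Int), Dom_max_flips arr → Spec_max_flips arr (max_flips arr)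

-- ===== LEMMAS AND PROOFS =====

lemma pvHeapPush_perm (heap : List Int) (v : Int) : List.Perm (pvHeapPush heap v) (v :: heap) := by
  induction heap with
  | nil => simp [pvHeapPush]
  | cons y t ih =>
    simp only [pvHeapPush]
    split
    · exact List.Perm.refl _
    · exact (ih.cons y).trans (List.Perm.swap v y t)

lemma pvHeapPush_sorted (heap : List Int) (v : Int) (hs : heap.Pairwise (· ≤ ·)) :
    (pvHeapPush heap v).Pairwise (· ≤ ·) := by
  induction heap with
  | nil => simp [pvHeapPush]
  | cons y t ih =>
    simp only [pvHeapPush]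
    rw [List.pairwise_cons] at hs
    split
    · rename_i hvy
      rw [List.pairwise_cons]
      refine ⟨?_, by rw [List.pairwise_cons]; exact hs⟩
      intro b hb
      rcases List.mem_cons.mp hb with rfl | hb
      · exact hvy
      · exact le_trans hvy (hs.1 b hb)
    · rename_i hvy
      rw [List.pairwise_cons]
      refine ⟨?_, ih hs.2⟩
      intro b hb
      have hbm := (pvHeapPush_perm t v).mem_iff.mp hb
      rcases List.mem_cons.mp hbm with rfl | hb
      · omega
      · exact hs.1 b hb

lemma scan_max_spec (h : Int) (t : List Int) :
    (t.foldl (fun m v => if m < v then v else m) h) ∈ h :: t ∧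
    ∀ v ∈ h :: t, v ≤ t.foldl (fun m v => if m < v then v else m) h := by
  induction t generalizing h with
  | nil => simp
  | cons a t ih =>
    have hgoal : (a :: t).foldl (fun m v => if m < v then v else m) h
        = t.foldl (fun m v => if m < v then v else m) (if h < a then a else h) := rfl
    rw [hgoal]
    obtain ⟨hmem, hle⟩ := ih (if h < a then a else h)
    have hinit : (if h < a then a else h) ∈ h :: a :: t := by
      split_ifs <;> simp
    have hinitle : (if h < a then a else h) ≤
        t.foldl (fun m v => if m < v then v else m) (if h < a then a else h) :=
      hle _ (by simp)
    constructor
    · rw [List.mem_cons] at hmem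
      rcases hmem with he | hm
      · rw [he]; exact hinit
      · simp [hm]
    · intro v hv
      rw [List.mem_cons, List.mem_cons] at hv
      rcases hv with he | he | hm
      · subst he
        refine le_trans ?_ hinitle
        split_ifs with hha
        · exact le_of_lt hha
        · exact le_refl _
      · subst he
        refine le_trans ?_ hinitle
        split_ifs with hha
        · exact le_refl _
        · exact le_of_not_gt hha
      · exact hle v (by simp [hm])

lemma loop_eq (arr : List Int) : ∀ (flips cum : Int) (heap fl : List Int),
    heap.Pairwise (· ≤ ·) → List.Perm heap (fl.map (fun v => -v)) →
    pvMaxFlipsLoopA arr flips cum heap = pvMaxFlipsLoopB arr flips cum fl := by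
  induction arr with
  | nil => intro _ _ _ _ _ _; rfl
  | cons x rest ih =>
    intro flips cum heap fl hs hperm
    simp only [pvMaxFlipsLoopA, pvMaxFlipsLoopB]
    have hcum : cum + x - 2 * x = cum - x := by ring
    rw [hcum]
    set heap1 := pvHeapPush heap (-x) with hheap1
    have hperm1 : List.Perm heap1 ((fl ++ [x]).map (fun v => -v)) := by
      refine (pvHeapPush_perm heap (-x)).trans ?_
      have h2 : List.Perm ((fl ++ [x]).map (fun v => -v)) ((-x) :: fl.map (fun v => -v)) := by
        simp only [List.map_append, List.map_cons, List.map_nil]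
        exact (List.perm_append_singleton _ _)
      exact ((hperm.cons (-x)).trans h2.symm)
    have hs1 : heap1.Pairwise (· ≤ ·) := pvHeapPush_sorted heap (-x) hs
    by_cases hc : cum - x ≤ 0
    · simp only [if_pos hc]
      obtain ⟨h1, t1, hht⟩ : ∃ h1 t1, heap1 = h1 :: t1 := by
        cases hh : heap1 with
        | nil =>
          exfalso
          have hp := (pvHeapPush_perm heap (-x))
          rw [← hheap1, hh] at hp
          exact absurd hp.symm (by simp)
        | cons a b => exact ⟨a, b, rfl⟩
      obtain ⟨h2, t2, hft⟩ : ∃ h2 t2, fl ++ [x] = h2 :: t2 := by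
        cases fl with
        | nil => exact ⟨x, [], rfl⟩
        | cons a b => exact ⟨a, b ++ [x], rfl⟩
      rw [hht, hft]
      simp only []
      set m := t2.foldl (fun m v => if m < v then v else m) h2 with hm
      obtain ⟨hmmem, hmmax⟩ := scan_max_spec h2 t2
      rw [← hft] at hmmem hmmax
      rw [← hm] at hmmem hmmax
      have hperm1' : List.Perm (h1 :: t1) ((fl ++ [x]).map (fun v => -v)) := hht ▸ hperm1
      have hmin : ∀ b ∈ h1 :: t1, h1 ≤ b := by
        have hsc := hht ▸ hs1
        rw [List.pairwise_cons] at hsc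
        intro b hb
        rcases List.mem_cons.mp hb with rfl | hb
        · exact le_refl _
        · exact hsc.1 b hb
      have hh1m : h1 = -m := by
        have h1mem : h1 ∈ (fl ++ [x]).map (fun v => -v) := hperm1'.mem_iff.mp (by simp)
        obtain ⟨v, hv, hveq⟩ := List.mem_map.mp h1mem
        have hnm : -m ∈ h1 :: t1 := hperm1'.mem_iff.mpr (List.mem_map.mpr ⟨m, hmmem, rfl⟩)
        have h1le : h1 ≤ -m := hmin _ hnm
        have hvm : v ≤ m := hmmax v hv
        omega
      have hrem : PySem.List.remove? (fl ++ [x]) m = some ((fl ++ [x]).erase m) :=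
        PySem.List.remove?_eq_some_erase (fl ++ [x]) m hmmem
      rw [hft] at hrem
      rw [hrem]
      have hcumeq : cum - x + 2 * (-h1) = cum - x + 2 * m := by omega
      rw [hcumeq]
      apply ih
      · have hsc := hht ▸ hs1
        exact (List.pairwise_cons.mp hsc).2
      · have hfl1 : List.Perm (fl ++ [x]) (m :: (fl ++ [x]).erase m) := List.perm_cons_erase hmmem
        have hstep : List.Perm (h1 :: t1) ((-m) :: ((fl ++ [x]).erase m).map (fun v => -v)) := by
          refine hperm1'.trans ?_
          have hmp := hfl1.map (fun v => -v)
          simpa using hmp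
        rw [hh1m] at hstep
        have hfin := hstep.cons_inv
        rw [hft] at hfin
        exact hfin
    · simp only [if_neg hc]
      exact ih _ _ _ _ hs1 hperm1

-- ===== VERDICT (by name: the statement is the Claim_ definition above) =====
theorem max_flips_spec : Claim_equal_max_flips := by
  intro arr _
  unfold Spec_max_flips max_flips max_flips_alt
  exact loop_eq arr 0 0 [] [] (by simp) (by simp)
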